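-- pv_equiv track=rewrite | github.com/SS4G/Thu_synthesize_tmeplate_and_script | copy_2.py | extend_pattern_block
-- ===== SOURCE A (Python) =====
-- def repeat_block(
-- block=[],
-- repeat_time=1,
-- block_endline="\n",
-- pattern="&&&"
-- ):
--     block_repeated=[]
--     pat_len=len(pattern)
--     tmp_str=""
--     for number in range(repeat_time):#generate whole segment
--         for lines in block:#generate 1 block
--             line_len=len(lines)
--             tmp_str=lines
--             tmp_list=tmp_str.split(pattern)
--             block_repeated.append(str(number).join(tmp_list))
--         block_repeated.append(block_endline) #add 1 block end line
--     block_repeated.append("\n//-------------------\n") #add segment end line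
--     return block_repeated
--
-- def extend_pattern_block(pattern,buffer,repeat_time):
--     wr_lines=[]
--     pattern_block=[]
--     state="IDLE"
--     for line in buffer:
--             if state=="IDLE":
--                 if "*"+pattern+"_begin*" in line:
--                     state="BULID_BLOCK"
--                     pattern_block=[]#empty tmp_block
--                 else :
--                     wr_lines.append(line)#add the non-repeat line into write_base derectly
--             elif state=="BULID_BLOCK":
--                 if "*"+pattern+"_end*" in line:
--                     repeated_pattern_block=repeat_block(
--                     block=pattern_block,
--                     repeat_time=repeat_time,
--                     block_endline="",
--                     pattern=pattern
--                     )
--                     wr_lines.extend(repeated_pattern_block)#add extended pattern blocks in write lines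
--                     state="IDLE"
--                 else :
--                     pattern_block.append(line)
--     return wr_lines
-- ===== SOURCE B (Python) =====
-- def extend_pattern_block(pattern, buffer, repeat_time):
--     # Explicit index walk: copy lines until a begin marker, then scan forward
--     # for the end marker, expand the enclosed block inline, and resume after it.
--     begin_mark = "*" + pattern + "_begin*"
--     end_mark = "*" + pattern + "_end*"
--     out = []
--     i = 0
--     n = len(buffer)
--     while i < n:
--         line = buffer[i]
--         i += 1
--         if begin_mark not in line:
--             out.append(line)
--             continue
--         j = i
--         while j < n and end_mark not in buffer[j]:
--             j += 1
--         if j == n: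
--             break  # unterminated block: remaining lines are swallowed
--         for k in range(repeat_time):
--             for bl in buffer[i:j]:
--                 out.append(str(k).join(bl.split(pattern)))
--             out.append("")
--         out.append("\n//-------------------\n")
--         i = j + 1
--     return out
-- ===== Notes on version B (the rewrite author's own statement) =====
-- stated objective: alternative
-- what changed: Replaced A's IDLE/BUILD_BLOCK state-machine fold (with a mutating temporary block list and a separate repeat_block helper) by an explicit index walk that, on a begin marker, scans forward for the end marker, slices the block out, and inlines its expansion; the marker strings are built once instead of being re-concatenated for every line.
import Mathlib
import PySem

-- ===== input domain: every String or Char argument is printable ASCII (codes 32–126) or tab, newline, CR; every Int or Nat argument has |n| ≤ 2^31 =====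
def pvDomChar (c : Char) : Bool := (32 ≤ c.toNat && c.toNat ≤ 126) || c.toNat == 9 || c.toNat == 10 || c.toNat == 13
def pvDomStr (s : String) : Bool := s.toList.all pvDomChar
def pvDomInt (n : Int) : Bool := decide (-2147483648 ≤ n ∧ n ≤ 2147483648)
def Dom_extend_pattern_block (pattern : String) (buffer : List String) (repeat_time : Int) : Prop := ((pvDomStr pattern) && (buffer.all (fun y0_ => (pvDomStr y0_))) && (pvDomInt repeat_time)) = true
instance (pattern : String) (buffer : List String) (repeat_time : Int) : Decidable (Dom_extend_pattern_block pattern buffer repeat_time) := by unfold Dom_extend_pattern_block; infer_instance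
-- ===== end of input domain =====

-- B replaces A's IDLE/BUILD_BLOCK state-machine fold by an explicit scan that, on a
-- begin marker, looks ahead for the end marker and inlines the block expansion
-- (alternative decomposition; no speed claim).


-- ===== PORT A =====
-- str(number).join(lines.split(pattern)); split? is none only for pattern = "" (both Pythons raise there identically; both ports take getD [])
def pvSubstA (pattern : String) (number : Int) (lines : String) : String :=
  PySem.Str.join (PySem.Int.toStr number) ((PySem.Str.split? lines pattern).getD [])

def pvRepeatBlock (block : List String) (repeat_time : Int) (block_endline : String) (pattern : String) : List String :=
  let block_repeated : List String :=
    (PySem.List.pyRange 0 repeat_time 1).foldl (fun br number =>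
      (block.foldl (fun br2 lines => br2 ++ [pvSubstA pattern number lines]) br)
      ++ [block_endline]) []
  block_repeated ++ ["\n//-------------------\n"]

-- fold state: (wr_lines, pattern_block, state) with true = "IDLE", false = "BULID_BLOCK"
def pvStepA (pattern : String) (repeat_time : Int)
    (s : List String × List String × Bool) (line : String) : List String × List String × Bool :=
  let (wr, pb, idle) := s
  if idle then
    if PySem.Str.isIn ("*" ++ pattern ++ "_begin*") line then (wr, [], false)
    else (wr ++ [line], pb, true)
  else
    if PySem.Str.isIn ("*" ++ pattern ++ "_end*") line then
      (wr ++ pvRepeatBlock pb repeat_time "" pattern, pb, true)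
    else (wr, pb ++ [line], false)

def extend_pattern_block (pattern : String) (buffer : List String) (repeat_time : Int) : List String :=
  (buffer.foldl (pvStepA pattern repeat_time) ([], [], true)).1

-- ===== PORT B =====
def pvExpandB (pattern : String) (repeat_time : Int) (block : List String) : List String :=
  (PySem.List.pyRange 0 repeat_time 1).flatMap (fun k =>
    block.map (fun bl =>
      PySem.Str.join (PySem.Int.toStr k) ((PySem.Str.split? bl pattern).getD [])) ++ [""])
  ++ ["\n//-------------------\n"]

def pvWalkB (pattern : String) (repeat_time : Int) : List String → List String
  | [] => []
  | line :: rest =>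
    if PySem.Str.isIn ("*" ++ pattern ++ "_begin*") line then
      -- forward scan for the end marker
      match h : rest.dropWhile (fun l => !(PySem.Str.isIn ("*" ++ pattern ++ "_end*") l)) with
      | [] => []   -- unterminated block: remaining lines are swallowed
      | _ :: rest' =>
        pvExpandB pattern repeat_time
          (rest.takeWhile (fun l => !(PySem.Str.isIn ("*" ++ pattern ++ "_end*") l)))
          ++ pvWalkB pattern repeat_time rest'
    else
      line :: pvWalkB pattern repeat_time rest
termination_by l => l.length
decreasing_by
  · have h1 := List.length_dropWhile_le (fun l => !(PySem.Str.isIn ("*" ++ pattern ++ "_end*") l)) rest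
    rw [h] at h1; simp at h1 ⊢; omega
  · simp

def extend_pattern_block_alt (pattern : String) (buffer : List String) (repeat_time : Int) : List String :=
  pvWalkB pattern repeat_time buffer

-- ===== PRECONDITION & SPEC =====
def Spec_extend_pattern_block (pattern : String) (buffer : List String) (repeat_time : Int) (out : List String) : Prop := out = extend_pattern_block_alt pattern buffer repeat_time
instance (pattern : String) (buffer : List String) (repeat_time : Int) (out : List String) : Decidable (Spec_extend_pattern_block pattern buffer repeat_time out) := by unfold Spec_extend_pattern_block; infer_instance

-- ===== CLAIM (what is proved, stated in full; the proofs are below) =====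
def Claim_equal_extend_pattern_block : Prop := ∀ (pattern : String) (buffer : List String) (repeat_time : Int), Dom_extend_pattern_block pattern buffer repeat_time → Spec_extend_pattern_block pattern buffer repeat_time (extend_pattern_block pattern buffer repeat_time)

-- ===== LEMMAS AND PROOFS =====

-- A's repeat_block with block_endline = "" computes B's inline expansion.
theorem pvRepeatBlock_eq_expand (block : List String) (repeat_time : Int) (pattern : String) :
    pvRepeatBlock block repeat_time "" pattern = pvExpandB pattern repeat_time block := by
  unfold pvRepeatBlock pvExpandB
  have hinner : ∀ (number : Int) (br : List String),
      block.foldl (fun br2 lines => br2 ++ [pvSubstA pattern number lines]) br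
        = br ++ block.map (fun lines => pvSubstA pattern number lines) :=
    fun number br => PySem.List.foldl_append_singleton_eq_map _ block br
  have houter :
      (PySem.List.pyRange 0 repeat_time 1).foldl (fun br number =>
        (block.foldl (fun br2 lines => br2 ++ [pvSubstA pattern number lines]) br) ++ [""]) []
      = (PySem.List.pyRange 0 repeat_time 1).foldl (fun br number =>
          br ++ (block.map (fun lines => pvSubstA pattern number lines) ++ [""])) [] := by
    apply PySem.List.foldl_congr_mem
    intro br number _
    rw [hinner]; simp
  rw [houter, PySem.List.foldl_append_eq_flatMap]
  simp [pvSubstA]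

-- the continuation of A's fold from the BULID_BLOCK state
def pvBuildCont (pattern : String) (repeat_time : Int) (pb : List String) (buf : List String) : List String :=
  match buf.dropWhile (fun l => !(PySem.Str.isIn ("*" ++ pattern ++ "_end*") l)) with
  | [] => []
  | _ :: rest' =>
    pvExpandB pattern repeat_time (pb ++ buf.takeWhile (fun l => !(PySem.Str.isIn ("*" ++ pattern ++ "_end*") l)))
      ++ pvWalkB pattern repeat_time rest'

theorem pvFold_idle_build (n : Nat) : ∀ (pattern : String) (repeat_time : Int) (buf : List String),
    buf.length = n →
    (∀ wr pb, (buf.foldl (pvStepA pattern repeat_time) (wr, pb, true)).1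
        = wr ++ pvWalkB pattern repeat_time buf)
    ∧ (∀ wr pb, (buf.foldl (pvStepA pattern repeat_time) (wr, pb, false)).1
        = wr ++ pvBuildCont pattern repeat_time pb buf) := by
  induction n using Nat.strong_induction_on with
  | _ n ih =>
    intro pattern repeat_time buf hlen
    constructor
    · intro wr pb
      cases buf with
      | nil => simp [pvWalkB]
      | cons line rest =>
        rw [List.foldl_cons]
        by_cases hb : PySem.Str.isIn ("*" ++ pattern ++ "_begin*") line = true
        · have hb' := hb; simp at hb'
          have hstep : pvStepA pattern repeat_time (wr, pb, true) line = (wr, [], false) := by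
            simp [pvStepA, hb']
          have hih := (ih rest.length (by simp [← hlen]) pattern repeat_time rest rfl).2 wr []
          rw [hstep, hih]
          simp only [pvWalkB]
          rw [if_pos hb]
          unfold pvBuildCont
          cases hdw : rest.dropWhile (fun l => !(PySem.Str.isIn ("*" ++ pattern ++ "_end*") l)) with
          | nil => simp
          | cons x rest' => simp
        · have hb' := hb; simp at hb'
          have hstep : pvStepA pattern repeat_time (wr, pb, true) line = (wr ++ [line], pb, true) := by
            simp [pvStepA, hb']
          have hih := (ih rest.length (by simp [← hlen]) pattern repeat_time rest rfl).1 (wr ++ [line]) pb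
          rw [hstep, hih]
          simp only [pvWalkB]
          rw [if_neg hb]
          simp
    · intro wr pb
      cases buf with
      | nil => simp [pvBuildCont]
      | cons line rest =>
        rw [List.foldl_cons]
        by_cases he : PySem.Str.isIn ("*" ++ pattern ++ "_end*") line = true
        · have he' := he; simp at he'
          have hstep : pvStepA pattern repeat_time (wr, pb, false) line
              = (wr ++ pvRepeatBlock pb repeat_time "" pattern, pb, true) := by
            simp [pvStepA, he']
          have hih := (ih rest.length (by simp [← hlen]) pattern repeat_time rest rfl).1
            (wr ++ pvRepeatBlock pb repeat_time "" pattern) pb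
          rw [hstep, hih]
          unfold pvBuildCont
          have hdw : (line :: rest).dropWhile (fun l => !(PySem.Str.isIn ("*" ++ pattern ++ "_end*") l)) = line :: rest := by
            rw [List.dropWhile_cons_of_neg]; simp [he']
          have htw : (line :: rest).takeWhile (fun l => !(PySem.Str.isIn ("*" ++ pattern ++ "_end*") l)) = [] := by
            rw [List.takeWhile_cons_of_neg]; simp [he']
          rw [hdw]
          simp [pvRepeatBlock_eq_expand, he']
        · have he' := he; simp at he'
          have hstep : pvStepA pattern repeat_time (wr, pb, false) line = (wr, pb ++ [line], false) := by
            simp [pvStepA, he']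
          have hih := (ih rest.length (by simp [← hlen]) pattern repeat_time rest rfl).2 wr (pb ++ [line])
          rw [hstep, hih]
          unfold pvBuildCont
          have hdw : (line :: rest).dropWhile (fun l => !(PySem.Str.isIn ("*" ++ pattern ++ "_end*") l))
              = rest.dropWhile (fun l => !(PySem.Str.isIn ("*" ++ pattern ++ "_end*") l)) := by
            rw [List.dropWhile_cons_of_pos]; simp [he']
          have htw : (line :: rest).takeWhile (fun l => !(PySem.Str.isIn ("*" ++ pattern ++ "_end*") l))
              = line :: rest.takeWhile (fun l => !(PySem.Str.isIn ("*" ++ pattern ++ "_end*") l)) := by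
            rw [List.takeWhile_cons_of_pos]; simp [he']
          rw [hdw, htw]
          cases rest.dropWhile (fun l => !(PySem.Str.isIn ("*" ++ pattern ++ "_end*") l)) with
          | nil => simp
          | cons x rest' => simp

-- ===== VERDICT (by name: the statement is the Claim_ definition above) =====
theorem extend_pattern_block_spec : Claim_equal_extend_pattern_block := by
  intro pattern buffer repeat_time _
  unfold Spec_extend_pattern_block extend_pattern_block extend_pattern_block_alt
  have := (pvFold_idle_build buffer.length pattern repeat_time buffer rfl).1 [] []
  simpa using this
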